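-- pv_equiv track=rewrite | github.com/Dowzer721/vsCode-Sync | Tents&Trees/recursiveSolver_v1.1.py | placeInitialGrass
-- ===== SOURCE A (Python) =====
-- columnCounts = [2, 0, 1, 1, 1]
--
-- numberOfColumns = len(columnCounts)
--
-- rowCounts = [1, 1, 0, 2, 1]
--
-- numberOfRows = len(rowCounts)
--
-- def getNeighbours(r, c, adjacentOnly=True):
--     neighbours = [
--         (r-1, c-1),
--         (r-1, c),
--         (r-1, c+1),
--         (r, c+1),
--         (r+1, c+1),
--         (r+1, c),
--         (r+1, c-1),
--         (r, c-1)
--     ]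
--
--     if adjacentOnly:
--         # neighbours = [neighbours[i] for i in range(1, 8, 2)]
--         neighbours = [
--             neighbours[1],
--             neighbours[3],
--             neighbours[5],
--             neighbours[7]
--         ]
--
--     return neighbours
--
-- def placeInitialGrass(grid_):
--     for r in range(numberOfRows):
--         if rowCounts[r] == 0:
--             grid_[r] = ['G' if val=='X' else val for val in grid_[r]]
--         for c in range(numberOfColumns):
--             if columnCounts[c] == 0:
--                 for r_ in range(numberOfRows):
--                     if grid_[r_][c] == 'X':
--                         grid_[r_][c] = 'G'
--
--             if grid_[r][c] != 'X': continue
--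
--             neighbourValues = []
--             for nR, nC in getNeighbours(r, c):
--                 if (nR<0) or (nR==numberOfRows) or (nC<0) or (nC==numberOfColumns): continue
--                 neighbourValues.append(grid_[nR][nC])
--
--             if neighbourValues.count('T') == 0:
--                 grid_[r][c] = 'G'
--
--     return grid_
-- ===== SOURCE B (Python) =====
-- columnCounts = [2, 0, 1, 1, 1]
--
-- numberOfColumns = len(columnCounts)
--
-- rowCounts = [1, 1, 0, 2, 1]
--
-- numberOfRows = len(rowCounts)
--
-- # Alternative strategy: scan once for tents, scatter their orthogonal neighbours into
-- # a tentAdjacent index, then a single cell-wise pass decides each 'X' directly.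
-- def placeInitialGrass(grid_):
--     tentAdjacent = set()
--     for r in range(numberOfRows):
--         for c in range(numberOfColumns):
--             if grid_[r][c] == 'T':
--                 for nr, nc in ((r - 1, c), (r + 1, c), (r, c - 1), (r, c + 1)):
--                     if 0 <= nr < numberOfRows and 0 <= nc < numberOfColumns:
--                         tentAdjacent.add((nr, nc))
--     for r in range(numberOfRows):
--         row = grid_[r]
--         if rowCounts[r] == 0:
--             for c in range(len(row)):
--                 if row[c] == 'X':
--                     row[c] = 'G'
--         else:
--             for c in range(numberOfColumns):
--                 if row[c] == 'X' and (columnCounts[c] == 0 or (r, c) not in tentAdjacent):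
--                     row[c] = 'G'
--     return grid_
-- ===== Notes on version B (the rewrite author's own statement) =====
-- stated objective: alternative
-- what changed: B first scatters every tent's in-bounds orthogonal neighbours into a tentAdjacent index and then rewrites the grid in one direct pass per cell, instead of A's sequential sweep that re-scans each cell's neighbourhood and re-clears the zero-count column once per row.
import Mathlib
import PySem

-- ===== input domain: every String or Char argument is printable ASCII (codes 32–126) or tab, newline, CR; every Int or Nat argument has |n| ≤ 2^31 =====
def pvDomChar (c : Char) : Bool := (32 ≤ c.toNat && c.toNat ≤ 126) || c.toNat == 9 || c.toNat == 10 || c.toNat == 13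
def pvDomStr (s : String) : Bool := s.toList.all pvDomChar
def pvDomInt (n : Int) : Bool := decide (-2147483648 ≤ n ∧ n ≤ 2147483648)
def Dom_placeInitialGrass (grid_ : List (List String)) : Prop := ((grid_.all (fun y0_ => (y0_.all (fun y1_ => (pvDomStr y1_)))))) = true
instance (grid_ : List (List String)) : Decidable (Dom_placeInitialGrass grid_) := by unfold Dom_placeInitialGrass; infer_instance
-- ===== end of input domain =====

-- B replaces A's per-cell neighbour scanning (re-done while the grid is being rewritten) by one
-- up-front scatter pass that indexes every tent's orthogonal neighbours, then a single direct pass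
-- over the cells; equivalence is about the returned value (A and B both mutate `grid_` in place in
-- Python, A additionally replaces zero-count row lists by fresh lists).

-- ===== PORT A =====
def columnCounts : List Int := [2, 0, 1, 1, 1]
def numberOfColumns : Int := (columnCounts.length : Int)
def rowCounts : List Int := [1, 1, 0, 2, 1]
def numberOfRows : Int := (rowCounts.length : Int)

def getNeighbours (r c : Int) (adjacentOnly : Bool) : List (Int × Int) :=
  let neighbours : List (Int × Int) :=
    [(r-1,c-1),(r-1,c),(r-1,c+1),(r,c+1),(r+1,c+1),(r+1,c),(r+1,c-1),(r,c-1)]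
  -- the adjacentOnly branch selects literal elements 1,3,5,7 of the list above
  let neighbours := if adjacentOnly then [(r-1,c),(r,c+1),(r+1,c),(r,c-1)] else neighbours
  neighbours

-- grid_[r][c] (IndexError excluded by Pre_)
def pyCell (g : List (List String)) (r c : Int) : String :=
  (PySem.List.pyGet? ((PySem.List.pyGet? g r).getD []) c).getD ""
-- grid_[r][c] = v  (r, c nonnegative at every call site)
def pySetCell (g : List (List String)) (r c : Int) (v : String) : List (List String) :=
  g.set r.toNat (((PySem.List.pyGet? g r).getD []).set c.toNat v)

-- the inner "for r_ in range(numberOfRows): if grid_[r_][c]=='X': grid_[r_][c]='G'" loop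
def clearColumnA (c : Int) (g : List (List String)) : List (List String) :=
  (PySem.List.pyRange 0 numberOfRows).foldl (fun g r_ =>
    if pyCell g r_ c == "X" then pySetCell g r_ c "G" else g) g

-- the per-cell part: "if grid_[r][c] != 'X': continue; …"
def cellStepA (r c : Int) (g : List (List String)) : List (List String) :=
  if pyCell g r c != "X" then g
  else
    let neighbourValues := (getNeighbours r c true).foldl (fun acc p =>
      if decide (p.1 < 0) || (p.1 == numberOfRows) || decide (p.2 < 0) || (p.2 == numberOfColumns)
      then acc else acc ++ [pyCell g p.1 p.2]) []
    if neighbourValues.count "T" == 0 then pySetCell g r c "G" else g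

def placeInitialGrass (grid_ : List (List String)) : List (List String) :=
  (PySem.List.pyRange 0 numberOfRows).foldl (fun g r =>
    let g := if (PySem.List.pyGet? rowCounts r).getD 0 == 0
             then g.set r.toNat (((PySem.List.pyGet? g r).getD []).map
                    (fun val => if val == "X" then "G" else val))
             else g
    (PySem.List.pyRange 0 numberOfColumns).foldl (fun g c =>
      let g := if (PySem.List.pyGet? columnCounts c).getD 0 == 0 then clearColumnA c g else g
      cellStepA r c g) g) grid_

-- ===== PORT B =====
-- scatter pass: every in-bounds orthogonal neighbour of a tent
def tentAdjacentB (grid_ : List (List String)) : PySem.Set (Int × Int) :=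
  (PySem.List.pyRange 0 numberOfRows).foldl (fun s r =>
    (PySem.List.pyRange 0 numberOfColumns).foldl (fun s c =>
      if pyCell grid_ r c == "T" then
        ([(r-1,c),(r+1,c),(r,c-1),(r,c+1)] : List (Int × Int)).foldl (fun s nb =>
          if decide (0 ≤ nb.1) && decide (nb.1 < numberOfRows) && decide (0 ≤ nb.2) && decide (nb.2 < numberOfColumns)
          then s.add nb else s) s
      else s) s) (PySem.Set.ofList [])

def placeInitialGrass_alt (grid_ : List (List String)) : List (List String) :=
  let tentAdjacent := tentAdjacentB grid_
  (PySem.List.pyRange 0 numberOfRows).foldl (fun g r =>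
    let row := (PySem.List.pyGet? g r).getD []
    let row' :=
      if (PySem.List.pyGet? rowCounts r).getD 0 == 0 then
        (PySem.List.pyRange 0 (row.length : Int)).foldl (fun row c =>
          if (PySem.List.pyGet? row c).getD "" == "X" then row.set c.toNat "G" else row) row
      else
        (PySem.List.pyRange 0 numberOfColumns).foldl (fun row c =>
          if (((PySem.List.pyGet? row c).getD "" == "X") &&
              (((PySem.List.pyGet? columnCounts c).getD 0 == 0) || !(decide ((r, c) ∈ tentAdjacent))))
          then row.set c.toNat "G" else row) row
    g.set r.toNat row') grid_

-- ===== PRECONDITION & SPEC =====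
-- Pre_ excludes exactly the grids on which the Python raises IndexError: both programs index
-- grid_[r][c] for all r, c < 5, so the grid needs at least 5 rows whose first 5 rows each have
-- at least 5 cells.
def Pre_placeInitialGrass (grid_ : List (List String)) : Prop :=
  5 ≤ grid_.length ∧ ∀ i, i < 5 → 5 ≤ (grid_.getD i []).length
instance (grid_ : List (List String)) : Decidable (Pre_placeInitialGrass grid_) := by
  unfold Pre_placeInitialGrass; infer_instance

def pvWitness_placeInitialGrass : List (List String) :=
  [["X","X","T","X","X"],["X","G","X","X","X"],["X","X","X","X","X"],["T","X","X","X","X"],["X","X","X","X","T"]]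

def Spec_placeInitialGrass (grid_ : List (List String)) (out : List (List String)) : Prop := out = placeInitialGrass_alt grid_
instance (grid_ : List (List String)) (out : List (List String)) : Decidable (Spec_placeInitialGrass grid_ out) := by unfold Spec_placeInitialGrass; infer_instance

-- ===== CLAIM (what is proved, stated in full; the proofs are below) =====
def Claim_equal_placeInitialGrass : Prop := ∀ (grid_ : List (List String)), Dom_placeInitialGrass grid_ → Pre_placeInitialGrass grid_ → Spec_placeInitialGrass grid_ (placeInitialGrass grid_)

-- ===== LEMMAS AND PROOFS =====

-- value of cell (r,c) (both programs only ever rewrite cells; "" stands for out of range)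
def cellAt (g : List (List String)) (r c : Nat) : String := (g.getD r []).getD c ""

-- one row with "X" turned into "G" at every index satisfying P
def rowApply (P : Nat → Bool) (row : List String) : List String :=
  row.mapIdx (fun j v => if P j && (v == "X") then "G" else v)

-- the whole grid with "X" turned into "G" at every cell satisfying M
def gApply (M : Nat → Nat → Bool) (g : List (List String)) : List (List String) :=
  g.mapIdx (fun i row => rowApply (M i) row)

-- some in-bounds orthogonal neighbour of (r,c) inside the 5×5 window is a tent
def hasT (g : List (List String)) (r c : Nat) : Bool :=
  (decide (0 ≤ (r:Int) - 1) && (pyCell g (↑r - 1) ↑c == "T")) ||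
  (decide ((c:Int) + 1 < 5) && (pyCell g ↑r (↑c + 1) == "T")) ||
  (decide ((r:Int) + 1 < 5) && (pyCell g (↑r + 1) ↑c == "T")) ||
  (decide (0 ≤ (c:Int) - 1) && (pyCell g ↑r (↑c - 1) == "T"))

theorem length_rowApply (P : Nat → Bool) (row : List String) :
    (rowApply P row).length = row.length := by simp [rowApply]

theorem getElem_rowApply (P : Nat → Bool) (row : List String) (j : Nat) (h : j < row.length) :
    (rowApply P row)[j]'(by simpa [length_rowApply] using h) =
      if P j && (row[j] == "X") then "G" else row[j] := by
  simp [rowApply]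

theorem getD_rowApply (P : Nat → Bool) (row : List String) (j : Nat) :
    (rowApply P row).getD j "" = if P j && (row.getD j "" == "X") then "G" else row.getD j "" := by
  rcases Nat.lt_or_ge j row.length with h | h
  · rw [List.getD_eq_getElem _ _ (by simpa [length_rowApply] using h), List.getD_eq_getElem _ _ h,
      getElem_rowApply]
  · rw [List.getD_eq_default _ _ (by simpa [length_rowApply] using h), List.getD_eq_default _ _ h]
    simp

theorem rowApply_congr {P Q : Nat → Bool} (row : List String)
    (h : ∀ j, j < row.length → (P j && (row[j]! == "X")) = (Q j && (row[j]! == "X"))) :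
    rowApply P row = rowApply Q row := by
  apply List.ext_getElem (by simp [length_rowApply])
  intro j h1 h2
  have hj : j < row.length := by simpa [length_rowApply] using h1
  rw [getElem_rowApply _ _ _ hj, getElem_rowApply _ _ _ hj]
  have := h j hj
  rw [getElem!_pos row j hj] at this
  rw [this]

theorem rowApply_comp (P Q : Nat → Bool) (row : List String) :
    rowApply P (rowApply Q row) = rowApply (fun j => Q j || P j) row := by
  apply List.ext_getElem (by simp [length_rowApply])
  intro j h1 h2
  have hj : j < row.length := by simpa [length_rowApply] using h1
  rw [getElem_rowApply _ _ _ (by simpa [length_rowApply] using hj), getElem_rowApply _ _ _ hj,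
    getElem_rowApply _ _ _ hj]
  cases hP : P j <;> cases hQ : Q j <;> cases hX : (row[j] == "X") <;> simp_all

theorem rowApply_false (row : List String) : rowApply (fun _ => false) row = row := by
  apply List.ext_getElem (by simp [length_rowApply])
  intro j h1 h2
  rw [getElem_rowApply _ _ _ h2]; simp

theorem length_gApply (M : Nat → Nat → Bool) (g : List (List String)) :
    (gApply M g).length = g.length := by simp [gApply]

theorem getD_gApply (M : Nat → Nat → Bool) (g : List (List String)) (i : Nat) :
    (gApply M g).getD i [] = rowApply (M i) (g.getD i []) := by
  rcases Nat.lt_or_ge i g.length with h | h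
  · rw [List.getD_eq_getElem _ _ (by simpa [length_gApply] using h), List.getD_eq_getElem _ _ h]
    simp [gApply]
  · rw [List.getD_eq_default _ _ (by simpa [length_gApply] using h), List.getD_eq_default _ _ h]
    simp [rowApply]

theorem cellAt_gApply (M : Nat → Nat → Bool) (g : List (List String)) (i j : Nat) :
    cellAt (gApply M g) i j =
      if M i j && (cellAt g i j == "X") then "G" else cellAt g i j := by
  unfold cellAt
  rw [getD_gApply, getD_rowApply]

theorem beqT_cellAt_gApply (M : Nat → Nat → Bool) (g : List (List String)) (i j : Nat) :
    (cellAt (gApply M g) i j == "T") = (cellAt g i j == "T") := by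
  rw [cellAt_gApply]
  by_cases h : (M i j && (cellAt g i j == "X")) = true
  · have hx : cellAt g i j = "X" := by
      cases h2 : (cellAt g i j == "X") <;> simp_all
    rw [if_pos h, hx]
    decide
  · rw [if_neg h]

theorem cellAt_default (g : List (List String)) (r c : Nat)
    (h : g.length ≤ r ∨ (g.getD r []).length ≤ c) : cellAt g r c = "" := by
  unfold cellAt
  rcases h with h | h
  · rw [List.getD_eq_default _ _ h]; simp
  · rw [List.getD_eq_default _ _ h]

theorem pyCell_natCast (g : List (List String)) (r c : Nat) :
    pyCell g ↑r ↑c = cellAt g r c := by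
  simp [pyCell, cellAt, PySem.List.pyGet?_natCast, List.getD_eq_getElem?_getD]

theorem pyCell_gApply_T (M : Nat → Nat → Bool) (g : List (List String)) (a b : Int)
    (ha : 0 ≤ a) (hb : 0 ≤ b) :
    (pyCell (gApply M g) a b == "T") = (pyCell g a b == "T") := by
  rw [show a = ((a.toNat : Nat) : Int) by omega, show b = ((b.toNat : Nat) : Int) by omega,
    pyCell_natCast, pyCell_natCast, beqT_cellAt_gApply]

theorem hasT_gApply (M : Nat → Nat → Bool) (g : List (List String)) (r c : Nat) :
    hasT (gApply M g) r c = hasT g r c := by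
  unfold hasT
  have t2 : (pyCell (gApply M g) ↑r (↑c + 1) == "T") = (pyCell g ↑r (↑c + 1) == "T") :=
    pyCell_gApply_T M g _ _ (by omega) (by omega)
  have t3 : (pyCell (gApply M g) (↑r + 1) ↑c == "T") = (pyCell g (↑r + 1) ↑c == "T") :=
    pyCell_gApply_T M g _ _ (by omega) (by omega)
  rw [t2, t3]
  by_cases h1 : 1 ≤ r <;> by_cases h4 : 1 ≤ c
  · rw [pyCell_gApply_T M g _ _ (by omega) (by omega : 0 ≤ (c:Int)),
      pyCell_gApply_T M g _ _ (by omega : 0 ≤ (r:Int)) (by omega)]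
  · simp [h1, h4, pyCell_gApply_T M g _ _ (by omega : 0 ≤ (r:Int) - 1) (by omega : 0 ≤ (c:Int))]
  · simp [h1, h4, pyCell_gApply_T M g _ _ (by omega : 0 ≤ (r:Int)) (by omega : 0 ≤ (c:Int) - 1)]
  · simp [h1, h4]

theorem gApply_false (g : List (List String)) : gApply (fun _ _ => false) g = g := by
  apply List.ext_getElem (by simp [length_gApply])
  intro i h1 h2
  simp [gApply, rowApply_false]

theorem gApply_congr {M N : Nat → Nat → Bool} (g : List (List String))
    (h : ∀ i j, i < g.length → j < (g.getD i []).length →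
      (M i j && (cellAt g i j == "X")) = (N i j && (cellAt g i j == "X"))) :
    gApply M g = gApply N g := by
  apply List.ext_getElem (by simp [length_gApply])
  intro i h1 h2
  have hi : i < g.length := by simpa [length_gApply] using h1
  simp only [gApply, List.getElem_mapIdx]
  apply rowApply_congr
  intro j hj
  have hrow : g[i] = g.getD i [] := (List.getD_eq_getElem _ _ hi).symm
  have hcell : g[i][j]! = cellAt g i j := by
    rw [getElem!_pos g[i] j hj, cellAt, ← hrow, List.getD_eq_getElem _ _ hj]
  rw [hcell]
  exact h i j hi (by rwa [← hrow])


theorem setCellG_spec (M : Nat → Nat → Bool) (g : List (List String)) (r c : Nat)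
    (h : cellAt (gApply M g) r c = "X") :
    pySetCell (gApply M g) ↑r ↑c "G" =
      gApply (fun i j => M i j || (decide (i = r) && decide (j = c))) g := by
  have hr : r < g.length := by
    by_contra hr
    rw [cellAt_default _ _ _ (Or.inl (by simpa [length_gApply] using Nat.le_of_not_lt hr))] at h
    exact absurd h (by decide)
  have hc : c < (g.getD r []).length := by
    by_contra hc
    rw [cellAt_default _ _ _ (Or.inr (by
      rw [getD_gApply, length_rowApply]; exact Nat.le_of_not_lt hc))] at h
    exact absurd h (by decide)
  have hx : cellAt g r c = "X" := by
    rw [cellAt_gApply] at h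
    by_cases hb : (M r c && (cellAt g r c == "X")) = true
    · exact absurd h (by rw [if_pos hb]; decide)
    · rwa [if_neg hb] at h
  rw [List.getD_eq_getElem g [] hr] at hc
  have hrowc : g[r][c] = "X" := by
    rw [cellAt, List.getD_eq_getElem g [] hr, List.getD_eq_getElem _ _ hc] at hx
    exact hx
  unfold pySetCell
  rw [PySem.List.pyGet?_natCast, Int.toNat_natCast, Int.toNat_natCast,
    ← List.getD_eq_getElem?_getD, getD_gApply, List.getD_eq_getElem g [] hr]
  apply List.ext_getElem (by simp [gApply])
  intro i h1 h2
  have hi : i < g.length := by simpa [length_gApply] using h1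
  rw [List.getElem_set]
  simp only [gApply, List.getElem_mapIdx]
  by_cases hir : r = i
  · subst hir
    rw [if_pos rfl]
    apply List.ext_getElem (by simp [length_rowApply])
    intro j hj1 hj2
    have hjr : j < g[r].length := by simpa [length_rowApply] using hj1
    rw [List.getElem_set]
    by_cases hjc : c = j
    · subst hjc
      rw [if_pos rfl, getElem_rowApply _ _ _ hjr]
      simp [hrowc]
    · rw [if_neg hjc, getElem_rowApply _ _ _ hjr, getElem_rowApply _ _ _ hjr]
      simp [Ne.symm hjc]
  · rw [if_neg hir]
    apply rowApply_congr
    intro j hj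
    simp [Ne.symm hir]

theorem gApply_mark_skip (M : Nat → Nat → Bool) (g : List (List String)) (r c : Nat) (b : Bool)
    (h : cellAt (gApply M g) r c ≠ "X") :
    gApply (fun i j => M i j || (decide (i = r) && decide (j = c) && b)) g = gApply M g := by
  apply gApply_congr
  intro i j hi hj
  by_cases hir : i = r
  · by_cases hjc : j = c
    · subst hir; subst hjc
      cases hX : (cellAt g i j == "X")
      · simp
      · have hx : cellAt g i j = "X" := by simpa using hX
        have hM : M i j = true := by
          rw [cellAt_gApply, hx] at h
          by_cases hb : (M i j && ("X" == "X")) = true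
          · simpa using hb
          · rw [if_neg hb] at h; exact absurd hx (by simp_all)
        simp [hM]
    · simp [hjc]
  · simp [hir]

set_option maxHeartbeats 1000000 in
theorem countT_spec (G : List (List String)) (r c : Nat) (hr : r < 5) (hc : c < 5) :
    (((getNeighbours ↑r ↑c true).foldl (fun acc p =>
      if decide (p.1 < 0) || (p.1 == numberOfRows) || decide (p.2 < 0) || (p.2 == numberOfColumns)
      then acc else acc ++ [pyCell G p.1 p.2]) []).count "T" == 0) = !hasT G r c := by
  have g1 : (decide ((↑r:Int) - 1 < 0) || (((↑r:Int) - 1) == numberOfRows) || decide ((↑c:Int) < 0) || ((↑c:Int) == numberOfColumns)) = !decide (0 ≤ (r:Int) - 1) := by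
    rw [Bool.eq_iff_iff]
    simp [numberOfRows, numberOfColumns, rowCounts, columnCounts]
    omega
  have g2 : (decide ((↑r:Int) < 0) || (((↑r:Int)) == numberOfRows) || decide ((↑c:Int) + 1 < 0) || (((↑c:Int) + 1) == numberOfColumns)) = !decide ((c:Int) + 1 < 5) := by
    rw [Bool.eq_iff_iff]
    simp [numberOfRows, numberOfColumns, rowCounts, columnCounts]
    omega
  have g3 : (decide ((↑r:Int) + 1 < 0) || (((↑r:Int) + 1) == numberOfRows) || decide ((↑c:Int) < 0) || ((↑c:Int) == numberOfColumns)) = !decide ((r:Int) + 1 < 5) := by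
    rw [Bool.eq_iff_iff]
    simp [numberOfRows, numberOfColumns, rowCounts, columnCounts]
    omega
  have g4 : (decide ((↑r:Int) < 0) || (((↑r:Int)) == numberOfRows) || decide ((↑c:Int) - 1 < 0) || (((↑c:Int) - 1) == numberOfColumns)) = !decide (0 ≤ (c:Int) - 1) := by
    rw [Bool.eq_iff_iff]
    simp [numberOfRows, numberOfColumns, rowCounts, columnCounts]
    omega
  simp only [getNeighbours, if_true, List.foldl_cons, List.foldl_nil]
  rw [g1, g2, g3, g4]
  unfold hasT
  generalize decide (0 ≤ (r:Int) - 1) = b1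
  generalize decide ((c:Int) + 1 < 5) = b2
  generalize decide ((r:Int) + 1 < 5) = b3
  generalize decide (0 ≤ (c:Int) - 1) = b4
  cases b1 <;> cases b2 <;> cases b3 <;> cases b4 <;>
    simp only [Bool.not_true, Bool.not_false, Bool.false_eq_true, if_false, if_true,
      eq_self_iff_true, List.nil_append, List.count_append, List.count_cons, List.count_nil,
      List.count_eq_zero, Bool.false_and, Bool.true_and, Bool.false_or, Bool.or_false] <;>
    (rw [Bool.eq_iff_iff]; simp; try tauto)
theorem clearCell_spec (M : Nat → Nat → Bool) (g : List (List String)) (r c : Nat) :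
    (if (pyCell (gApply M g) ↑r ↑c == "X") = true then pySetCell (gApply M g) ↑r ↑c "G"
     else gApply M g) =
      gApply (fun i j => M i j || (decide (i = r) && decide (j = c))) g := by
  by_cases h : cellAt (gApply M g) r c = "X"
  · rw [if_pos (by rw [pyCell_natCast]; simp [h])]
    exact setCellG_spec M g r c h
  · rw [if_neg (by rw [pyCell_natCast]; simp [h])]
    have := gApply_mark_skip M g r c true h
    simp only [Bool.and_true] at this
    exact this.symm

theorem cellStepA_spec (M : Nat → Nat → Bool) (g : List (List String)) (r c : Nat)
    (hr : r < 5) (hc : c < 5) :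
    cellStepA ↑r ↑c (gApply M g) =
      gApply (fun i j => M i j || (decide (i = r) && decide (j = c) && !hasT g r c)) g := by
  unfold cellStepA
  by_cases h : cellAt (gApply M g) r c = "X"
  · rw [if_neg (by rw [pyCell_natCast]; simp [h])]
    have hcnt := countT_spec (gApply M g) r c hr hc
    rw [hasT_gApply] at hcnt
    simp only [hcnt]
    cases hT : hasT g r c
    · simp only [Bool.not_false, if_true, Bool.and_true]
      exact setCellG_spec M g r c h
    · simp only [Bool.not_true, Bool.false_eq_true, if_false, Bool.and_false, Bool.or_false]
  · rw [if_pos (by rw [pyCell_natCast]; simp [h])]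
    exact (gApply_mark_skip M g r c _ h).symm

theorem clearColumnA_spec (M : Nat → Nat → Bool) (g : List (List String)) (c : Nat) :
    clearColumnA ↑c (gApply M g) =
      gApply (fun i j => ((((M i j
        || (decide (i = 0) && decide (j = c)))
        || (decide (i = 1) && decide (j = c)))
        || (decide (i = 2) && decide (j = c)))
        || (decide (i = 3) && decide (j = c)))
        || (decide (i = 4) && decide (j = c))) g := by
  unfold clearColumnA
  rw [show PySem.List.pyRange 0 numberOfRows = [((0:Nat):Int), ((1:Nat):Int), ((2:Nat):Int), ((3:Nat):Int), ((4:Nat):Int)] from by decide]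
  simp only [List.foldl_cons, List.foldl_nil]
  rw [clearCell_spec M g 0 c, clearCell_spec _ g 1 c, clearCell_spec _ g 2 c,
    clearCell_spec _ g 3 c, clearCell_spec _ g 4 c]
theorem map_rowApply (P : Nat → Bool) (row : List String) :
    (rowApply P row).map (fun val => if val == "X" then "G" else val) =
      rowApply (fun _ => true) row := by
  apply List.ext_getElem (by simp [length_rowApply])
  intro j h1 h2
  have hj : j < row.length := by simpa [length_rowApply] using h1
  rw [List.getElem_map, getElem_rowApply _ _ _ hj, getElem_rowApply _ _ _ hj]
  cases hP : P j <;> cases hX : (row[j] == "X") <;> simp_all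

theorem gApply_set (M : Nat → Nat → Bool) (g : List (List String)) (r : Nat) (Q : Nat → Bool) :
    (gApply M g).set r (rowApply Q (g.getD r [])) =
      gApply (fun i j => if i = r then Q j else M i j) g := by
  apply List.ext_getElem (by simp [gApply])
  intro i h1 h2
  have hi : i < g.length := by simpa [length_gApply] using h1
  rw [List.getElem_set]
  simp only [gApply, List.getElem_mapIdx]
  by_cases hir : r = i
  · subst hir
    rw [if_pos rfl, List.getD_eq_getElem g [] hi]
    apply rowApply_congr
    intro j hj
    simp
  · rw [if_neg hir]
    apply rowApply_congr
    intro j hj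
    simp [Ne.symm hir]

theorem rowClear2_spec (M : Nat → Nat → Bool) (g : List (List String)) :
    (gApply M g).set ((2:Nat):Int).toNat
        (((PySem.List.pyGet? (gApply M g) ((2:Nat):Int)).getD []).map
          (fun val => if val == "X" then "G" else val)) =
      gApply (fun i j => M i j || decide (i = 2)) g := by
  rw [Int.toNat_natCast, PySem.List.pyGet?_natCast, ← List.getD_eq_getElem?_getD, getD_gApply,
    map_rowApply, gApply_set]
  apply gApply_congr
  intro i j hi hj
  by_cases h : i = 2 <;> simp [h]

def MAfun (g : List (List String)) (i j : Nat) : Bool :=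
  decide (i = 2) || (decide (i < 5) && decide (j = 1)) ||
    (decide (i < 5) && decide (j < 5) && !hasT g i j)
set_option maxHeartbeats 4000000 in
theorem A_char (grid_ : List (List String)) :
    placeInitialGrass grid_ = gApply (MAfun grid_) grid_ := by
  have hr0 : ((PySem.List.pyGet? rowCounts ((0:Nat):Int)).getD 0 == 0) = false := by decide
  have hr1 : ((PySem.List.pyGet? rowCounts ((1:Nat):Int)).getD 0 == 0) = false := by decide
  have hr2 : ((PySem.List.pyGet? rowCounts ((2:Nat):Int)).getD 0 == 0) = true := by decide
  have hr3 : ((PySem.List.pyGet? rowCounts ((3:Nat):Int)).getD 0 == 0) = false := by decide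
  have hr4 : ((PySem.List.pyGet? rowCounts ((4:Nat):Int)).getD 0 == 0) = false := by decide
  have hc0 : ((PySem.List.pyGet? columnCounts ((0:Nat):Int)).getD 0 == 0) = false := by decide
  have hc1 : ((PySem.List.pyGet? columnCounts ((1:Nat):Int)).getD 0 == 0) = true := by decide
  have hc2 : ((PySem.List.pyGet? columnCounts ((2:Nat):Int)).getD 0 == 0) = false := by decide
  have hc3 : ((PySem.List.pyGet? columnCounts ((3:Nat):Int)).getD 0 == 0) = false := by decide
  have hc4 : ((PySem.List.pyGet? columnCounts ((4:Nat):Int)).getD 0 == 0) = false := by decide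
  unfold placeInitialGrass
  rw [show PySem.List.pyRange 0 numberOfRows =
        [((0:Nat):Int), ((1:Nat):Int), ((2:Nat):Int), ((3:Nat):Int), ((4:Nat):Int)] from by decide,
      show PySem.List.pyRange 0 numberOfColumns =
        [((0:Nat):Int), ((1:Nat):Int), ((2:Nat):Int), ((3:Nat):Int), ((4:Nat):Int)] from by decide]
  simp only [List.foldl_cons, List.foldl_nil, hr0, hr1, hr2, hr3, hr4, hc0, hc1, hc2, hc3, hc4,
    Bool.false_eq_true, if_false, if_true, eq_self_iff_true]
  conv_lhs => rw [← gApply_false grid_]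
  rw [cellStepA_spec _ grid_ 0 0 (by omega) (by omega)]
  rw [clearColumnA_spec _ grid_ 1]
  rw [cellStepA_spec _ grid_ 0 1 (by omega) (by omega)]
  rw [cellStepA_spec _ grid_ 0 2 (by omega) (by omega)]
  rw [cellStepA_spec _ grid_ 0 3 (by omega) (by omega)]
  rw [cellStepA_spec _ grid_ 0 4 (by omega) (by omega)]
  rw [cellStepA_spec _ grid_ 1 0 (by omega) (by omega)]
  rw [clearColumnA_spec _ grid_ 1]
  rw [cellStepA_spec _ grid_ 1 1 (by omega) (by omega)]
  rw [cellStepA_spec _ grid_ 1 2 (by omega) (by omega)]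
  rw [cellStepA_spec _ grid_ 1 3 (by omega) (by omega)]
  rw [cellStepA_spec _ grid_ 1 4 (by omega) (by omega)]
  rw [rowClear2_spec]
  rw [cellStepA_spec _ grid_ 2 0 (by omega) (by omega)]
  rw [clearColumnA_spec _ grid_ 1]
  rw [cellStepA_spec _ grid_ 2 1 (by omega) (by omega)]
  rw [cellStepA_spec _ grid_ 2 2 (by omega) (by omega)]
  rw [cellStepA_spec _ grid_ 2 3 (by omega) (by omega)]
  rw [cellStepA_spec _ grid_ 2 4 (by omega) (by omega)]
  rw [cellStepA_spec _ grid_ 3 0 (by omega) (by omega)]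
  rw [clearColumnA_spec _ grid_ 1]
  rw [cellStepA_spec _ grid_ 3 1 (by omega) (by omega)]
  rw [cellStepA_spec _ grid_ 3 2 (by omega) (by omega)]
  rw [cellStepA_spec _ grid_ 3 3 (by omega) (by omega)]
  rw [cellStepA_spec _ grid_ 3 4 (by omega) (by omega)]
  rw [cellStepA_spec _ grid_ 4 0 (by omega) (by omega)]
  rw [clearColumnA_spec _ grid_ 1]
  rw [cellStepA_spec _ grid_ 4 1 (by omega) (by omega)]
  rw [cellStepA_spec _ grid_ 4 2 (by omega) (by omega)]
  rw [cellStepA_spec _ grid_ 4 3 (by omega) (by omega)]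
  rw [cellStepA_spec _ grid_ 4 4 (by omega) (by omega)]
  apply gApply_congr
  intro i j hi hj
  unfold MAfun
  by_cases hj5 : j < 5
  · by_cases hi5 : i < 5
    · interval_cases i <;> interval_cases j <;> simp
    · simp [show ¬(i < 5) from hi5, show i ≠ 0 from by omega, show i ≠ 1 from by omega,
        show i ≠ 2 from by omega, show i ≠ 3 from by omega, show i ≠ 4 from by omega]
  · simp [show ¬(j < 5) from hj5, show j ≠ 0 from by omega, show j ≠ 1 from by omega,
      show j ≠ 2 from by omega, show j ≠ 3 from by omega, show j ≠ 4 from by omega]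
-- p is an in-bounds orthogonal neighbour of tent cell (r,c)
def NbOf (r c : Int) (p : Int × Int) : Prop :=
  (1 ≤ r ∧ p = (r-1, c)) ∨ (r + 1 < 5 ∧ p = (r+1, c)) ∨
  (1 ≤ c ∧ p = (r, c-1)) ∨ (c + 1 < 5 ∧ p = (r, c+1))

theorem mem_add_if (s : PySem.Set (Int × Int)) (P : Prop) [Decidable P] (x p : Int × Int) :
    (p ∈ (if P then s.add x else s)) ↔ (p ∈ s ∨ (P ∧ p = x)) := by
  split <;> rename_i h <;> simp [PySem.Set.mem_add, h] <;> tauto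

theorem mem_scatter4 (r c : Int) (s : PySem.Set (Int × Int)) (p : Int × Int)
    (hr : 0 ≤ r) (hr5 : r < 5) (hc : 0 ≤ c) (hc5 : c < 5) :
    (p ∈ ([(r-1,c),(r+1,c),(r,c-1),(r,c+1)] : List (Int × Int)).foldl (fun s nb =>
      if decide (0 ≤ nb.1) && decide (nb.1 < numberOfRows) && decide (0 ≤ nb.2) && decide (nb.2 < numberOfColumns)
      then s.add nb else s) s)
    ↔ (p ∈ s ∨ NbOf r c p) := by
  have hg : ∀ a b : Int, ((decide (0 ≤ a) && decide (a < numberOfRows) && decide (0 ≤ b) && decide (b < numberOfColumns)) = true) ↔ (0 ≤ a ∧ a < 5 ∧ 0 ≤ b ∧ b < 5) := by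
    intro a b
    simp [numberOfRows, numberOfColumns, rowCounts, columnCounts]
    tauto
  simp only [List.foldl_cons, List.foldl_nil, mem_add_if, hg, NbOf, or_assoc]
  constructor <;>
  · rintro (h | ⟨hb, hp⟩ | ⟨hb, hp⟩ | ⟨hb, hp⟩ | ⟨hb, hp⟩)
    · exact Or.inl h
    · exact Or.inr (Or.inl ⟨by omega, hp⟩)
    · exact Or.inr (Or.inr (Or.inl ⟨by omega, hp⟩))
    · exact Or.inr (Or.inr (Or.inr (Or.inl ⟨by omega, hp⟩)))
    · exact Or.inr (Or.inr (Or.inr (Or.inr ⟨by omega, hp⟩)))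

theorem mem_foldl_acc {α : Type} (l : List α) (f : PySem.Set (Int × Int) → α → PySem.Set (Int × Int))
    (Q : α → Int × Int → Prop) (p : Int × Int)
    (hf : ∀ s a, a ∈ l → (p ∈ f s a ↔ p ∈ s ∨ Q a p)) :
    ∀ s, p ∈ l.foldl f s ↔ p ∈ s ∨ ∃ a ∈ l, Q a p := by
  induction l with
  | nil => intro s; simp
  | cons x xs ih =>
    intro s
    rw [List.foldl_cons, ih (fun s a ha => hf s a (List.mem_cons_of_mem _ ha)),
      hf s x List.mem_cons_self]
    simp only [List.mem_cons]
    constructor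
    · rintro ((h | h) | ⟨a, ha, hq⟩)
      · exact Or.inl h
      · exact Or.inr ⟨x, Or.inl rfl, h⟩
      · exact Or.inr ⟨a, Or.inr ha, hq⟩
    · rintro (h | ⟨a, rfl | ha, hq⟩)
      · exact Or.inl (Or.inl h)
      · exact Or.inl (Or.inr hq)
      · exact Or.inr ⟨a, ha, hq⟩

theorem mem_tentAdjacentB (grid_ : List (List String)) (p : Int × Int) :
    p ∈ tentAdjacentB grid_ ↔
      ∃ r, 0 ≤ r ∧ r < 5 ∧ ∃ c, 0 ≤ c ∧ c < 5 ∧ pyCell grid_ r c = "T" ∧ NbOf r c p := by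
  unfold tentAdjacentB
  rw [mem_foldl_acc _ _ (fun r p => ∃ c, 0 ≤ c ∧ c < 5 ∧ pyCell grid_ r c = "T" ∧ NbOf r c p) p ?hf]
  case hf =>
    intro s r hr
    have hr' := PySem.List.mem_pyRange_one.mp hr
    have hr5 : r < 5 := by simpa [numberOfRows, rowCounts] using hr'.2
    rw [mem_foldl_acc _ _ (fun c p => pyCell grid_ r c = "T" ∧ NbOf r c p) p ?hf2]
    case hf2 =>
      intro s c hc
      have hc' := PySem.List.mem_pyRange_one.mp hc
      have hc5 : c < 5 := by simpa [numberOfColumns, columnCounts] using hc'.2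
      by_cases ht : (pyCell grid_ r c == "T") = true
      · rw [if_pos ht, mem_scatter4 r c s p hr'.1 hr5 hc'.1 hc5]
        simp only [beq_iff_eq] at ht
        simp [ht]
      · rw [if_neg ht]
        simp only [beq_iff_eq] at ht
        simp [ht]
    constructor
    · rintro (h | ⟨c, hc, ht, hnb⟩)
      · exact Or.inl h
      · have hc' := PySem.List.mem_pyRange_one.mp hc
        exact Or.inr ⟨c, hc'.1, by simpa [numberOfColumns, columnCounts] using hc'.2, ht, hnb⟩
    · rintro (h | ⟨c, hc0, hc5, ht, hnb⟩)
      · exact Or.inl h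
      · exact Or.inr ⟨c, PySem.List.mem_pyRange_one.mpr ⟨hc0, by simpa [numberOfColumns, columnCounts]⟩, ht, hnb⟩
  simp only [PySem.Set.mem_ofList, List.not_mem_nil, false_or]
  constructor
  · rintro ⟨r, hrm, hrest⟩
    have hr' := PySem.List.mem_pyRange_one.mp hrm
    exact ⟨r, hr'.1, by simpa [numberOfRows, rowCounts] using hr'.2, hrest⟩
  · rintro ⟨r, hr0, hr5, hrest⟩
    exact ⟨r, PySem.List.mem_pyRange_one.mpr ⟨hr0, by simpa [numberOfRows, rowCounts]⟩, hrest⟩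

theorem adj_iff (grid_ : List (List String)) (i j : Nat) (hi : i < 5) (hj : j < 5) :
    decide ((((i:Nat):Int), ((j:Nat):Int)) ∈ tentAdjacentB grid_) = hasT grid_ i j := by
  rw [Bool.eq_iff_iff, decide_eq_true_iff, mem_tentAdjacentB]
  unfold hasT
  constructor
  · rintro ⟨r, hr0, hr5, c, hc0, hc5, ht, hnb⟩
    rcases hnb with ⟨hb, hp⟩ | ⟨hb, hp⟩ | ⟨hb, hp⟩ | ⟨hb, hp⟩ <;>
      rw [Prod.mk.injEq] at hp
    · -- tent below: r = i+1, c = j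
      have h1 : r = (i:Int) + 1 := by omega
      have h2 : c = (j:Int) := by omega
      subst h1; subst h2
      simp only [Bool.or_eq_true, Bool.and_eq_true, decide_eq_true_iff, beq_iff_eq]
      exact Or.inl (Or.inr ⟨by omega, ht⟩)
    · have h1 : r = (i:Int) - 1 := by omega
      have h2 : c = (j:Int) := by omega
      subst h1; subst h2
      simp only [Bool.or_eq_true, Bool.and_eq_true, decide_eq_true_iff, beq_iff_eq]
      exact Or.inl (Or.inl (Or.inl ⟨by omega, ht⟩))
    · have h1 : r = (i:Int) := by omega
      have h2 : c = (j:Int) + 1 := by omega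
      subst h1; subst h2
      simp only [Bool.or_eq_true, Bool.and_eq_true, decide_eq_true_iff, beq_iff_eq]
      exact Or.inl (Or.inl (Or.inr ⟨by omega, ht⟩))
    · have h1 : r = (i:Int) := by omega
      have h2 : c = (j:Int) - 1 := by omega
      subst h1; subst h2
      simp only [Bool.or_eq_true, Bool.and_eq_true, decide_eq_true_iff, beq_iff_eq]
      exact Or.inr ⟨by omega, ht⟩
  · intro h
    simp only [Bool.or_eq_true, Bool.and_eq_true, decide_eq_true_iff, beq_iff_eq] at h
    rcases h with ((⟨hb, ht⟩ | ⟨hb, ht⟩) | ⟨hb, ht⟩) | ⟨hb, ht⟩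
    · exact ⟨(i:Int) - 1, by omega, by omega, (j:Int), by omega, by omega, ht,
        Or.inr (Or.inl ⟨by omega, by rw [Prod.mk.injEq]; omega⟩)⟩
    · exact ⟨(i:Int), by omega, by omega, (j:Int) + 1, by omega, by omega, ht,
        Or.inr (Or.inr (Or.inl ⟨by omega, by rw [Prod.mk.injEq]; omega⟩))⟩
    · exact ⟨(i:Int) + 1, by omega, by omega, (j:Int), by omega, by omega, ht,
        Or.inl ⟨by omega, by rw [Prod.mk.injEq]; omega⟩⟩
    · exact ⟨(i:Int), by omega, by omega, (j:Int) - 1, by omega, by omega, ht,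
        Or.inr (Or.inr (Or.inr ⟨by omega, by rw [Prod.mk.injEq]; omega⟩))⟩

theorem rowSet_step (row : List String) (c : Int) (hc : 0 ≤ c) (q : Int → Bool) :
    (if ((PySem.List.pyGet? row c).getD "" == "X") && q c then row.set c.toNat "G" else row)
      = rowApply (fun j => decide ((j:Int) = c) && q ↑j) row := by
  have hcell : (PySem.List.pyGet? row c).getD "" = row.getD c.toNat "" := by
    rw [show c = ((c.toNat : Nat) : Int) by omega, PySem.List.pyGet?_natCast,
      List.getD_eq_getElem?_getD, Int.toNat_natCast]
  apply List.ext_getElem (by split <;> simp [length_rowApply])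
  intro j h1 h2
  have hj : j < row.length := by simpa [length_rowApply] using h2
  rw [getElem_rowApply _ _ _ hj]
  by_cases hcond : (((PySem.List.pyGet? row c).getD "" == "X") && q c) = true
  · simp only [if_pos hcond] at h1 ⊢
    rw [List.getElem_set]
    rcases Bool.and_eq_true_iff.mp hcond with ⟨hx, hq⟩
    by_cases hjc : (↑j : Int) = c
    · have hcj : c.toNat = j := by omega
      rw [if_pos hcj, hjc, hq]
      rw [hcell, hcj, List.getD_eq_getElem _ _ hj] at hx
      simp [hx]
    · rw [if_neg (by omega)]
      simp [hjc]
  · simp only [if_neg hcond]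
    by_cases hjc : (↑j : Int) = c
    · have hcj : c.toNat = j := by omega
      rw [hcell, hcj, List.getD_eq_getElem _ _ hj] at hcond
      rw [hjc]
      cases hx : (row[j] == "X")
      · simp [hx]
      · have : ¬ q c = true := by intro hq; exact hcond (by simp [hx, hq])
        simp [this, Bool.and_comm]
    · simp [hjc]
  
theorem rowFoldB (cs : List Int) (q : Int → Bool) (f : List String → Int → List String)
    (hf : ∀ row c, f row c =
      if ((PySem.List.pyGet? row c).getD "" == "X") && q c then row.set c.toNat "G" else row)
    (hcs : ∀ c ∈ cs, 0 ≤ c) :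
    ∀ row, cs.foldl f row = rowApply (fun j => decide ((j:Int) ∈ cs) && q ↑j) row := by
  induction cs with
  | nil =>
    intro row
    simp only [List.foldl_nil, List.not_mem_nil, decide_false, Bool.false_and]
    exact (rowApply_false row).symm
  | cons c cs ih =>
    intro row
    rw [List.foldl_cons, hf, rowSet_step row c (hcs c List.mem_cons_self) q,
      ih (fun c hc => hcs c (List.mem_cons_of_mem _ hc)), rowApply_comp]
    apply rowApply_congr
    intro j hj
    cases hq : q ↑j <;> cases hm : decide ((↑j : Int) ∈ cs) <;> simp_all [List.mem_cons]

theorem rowStepB_ne2 (M : Nat → Nat → Bool) (g : List (List String)) (adj : PySem.Set (Int × Int)) (r : Nat) :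
    (gApply M g).set ((r:Nat):Int).toNat
      ((PySem.List.pyRange 0 numberOfColumns).foldl (fun row c =>
         if ((PySem.List.pyGet? row c).getD "" == "X") &&
            (((PySem.List.pyGet? columnCounts c).getD 0 == 0) || !(decide ((((r:Nat):Int), c) ∈ adj)))
         then row.set c.toNat "G" else row)
       ((PySem.List.pyGet? (gApply M g) ((r:Nat):Int)).getD []))
    = gApply (fun i j => if i = r then (M r j ||
        (decide (((j:Nat):Int) ∈ PySem.List.pyRange 0 numberOfColumns) &&
          (((PySem.List.pyGet? columnCounts ((j:Nat):Int)).getD 0 == 0) ||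
            !(decide ((((r:Nat):Int), ((j:Nat):Int)) ∈ adj))))) else M i j) g := by
  rw [rowFoldB _ _ _ (fun row c => rfl) (fun c hc => (PySem.List.mem_pyRange_one.mp hc).1),
    PySem.List.pyGet?_natCast, ← List.getD_eq_getElem?_getD, getD_gApply, rowApply_comp,
    Int.toNat_natCast, gApply_set]

theorem rowStepB_2 (M : Nat → Nat → Bool) (g : List (List String)) :
    (gApply M g).set ((2:Nat):Int).toNat
      ((PySem.List.pyRange 0 ((((PySem.List.pyGet? (gApply M g) ((2:Nat):Int)).getD []).length : Nat) : Int)).foldl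
        (fun row c => if (PySem.List.pyGet? row c).getD "" == "X" then row.set c.toNat "G" else row)
        ((PySem.List.pyGet? (gApply M g) ((2:Nat):Int)).getD []))
    = gApply (fun i j => if i = 2 then (M 2 j ||
        decide (((j:Nat):Int) ∈ PySem.List.pyRange 0 ((g.getD 2 []).length : Int))) else M i j) g := by
  rw [rowFoldB _ (fun _ => true) _
      (fun row c => by rw [Bool.and_true]) (fun c hc => (PySem.List.mem_pyRange_one.mp hc).1),
    PySem.List.pyGet?_natCast, ← List.getD_eq_getElem?_getD, getD_gApply, rowApply_comp,
    Int.toNat_natCast, gApply_set]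
  apply gApply_congr
  intro i j hi hj
  by_cases hir : i = 2 <;> simp [hir, length_rowApply]

def MBfun (adj : PySem.Set (Int × Int)) (g : List (List String)) (i j : Nat) : Bool :=
  if i = 2 then decide (j < (g.getD 2 []).length)
  else if i < 5 then
    decide (j < 5) && (((PySem.List.pyGet? columnCounts ((j:Nat):Int)).getD 0 == 0) ||
      !(decide (((((i:Nat)):Int), ((j:Nat):Int)) ∈ adj)))
  else false

set_option maxHeartbeats 4000000 in
theorem B_char (grid_ : List (List String)) :
    placeInitialGrass_alt grid_ = gApply (MBfun (tentAdjacentB grid_) grid_) grid_ := by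
  have hr0 : ((PySem.List.pyGet? rowCounts ((0:Nat):Int)).getD 0 == 0) = false := by decide
  have hr1 : ((PySem.List.pyGet? rowCounts ((1:Nat):Int)).getD 0 == 0) = false := by decide
  have hr2 : ((PySem.List.pyGet? rowCounts ((2:Nat):Int)).getD 0 == 0) = true := by decide
  have hr3 : ((PySem.List.pyGet? rowCounts ((3:Nat):Int)).getD 0 == 0) = false := by decide
  have hr4 : ((PySem.List.pyGet? rowCounts ((4:Nat):Int)).getD 0 == 0) = false := by decide
  have hmem : ∀ jj : Nat, decide (((jj:Nat):Int) ∈ PySem.List.pyRange 0 numberOfColumns) = decide (jj < 5) := by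
    intro jj
    rw [Bool.eq_iff_iff]
    simp only [decide_eq_true_iff, PySem.List.mem_pyRange_one]
    constructor
    · intro h
      have := h.2
      simp [numberOfColumns, columnCounts] at this
      omega
    · intro h
      refine ⟨by omega, ?_⟩
      simp [numberOfColumns, columnCounts]
      omega
  simp only [placeInitialGrass_alt]
  generalize tentAdjacentB grid_ = adj
  rw [show PySem.List.pyRange 0 numberOfRows =
        [((0:Nat):Int), ((1:Nat):Int), ((2:Nat):Int), ((3:Nat):Int), ((4:Nat):Int)] from by decide]
  simp only [List.foldl_cons, List.foldl_nil, hr0, hr1, hr2, hr3, hr4,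
    Bool.false_eq_true, if_false, if_true, eq_self_iff_true]
  conv_lhs => rw [← gApply_false grid_]
  rw [rowStepB_ne2 _ grid_ adj 0, rowStepB_ne2 _ grid_ adj 1]
  rw [rowStepB_2]
  rw [rowStepB_ne2 _ grid_ adj 3, rowStepB_ne2 _ grid_ adj 4]
  apply gApply_congr
  intro i j hi hj
  unfold MBfun
  by_cases h0 : i = 0 <;> by_cases h1 : i = 1 <;> by_cases h2 : i = 2 <;>
    by_cases h3 : i = 3 <;> by_cases h4 : i = 4 <;> by_cases h5 : i < 5 <;>
    simp_all [hmem, PySem.List.mem_pyRange_one] <;> omega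

theorem colcnt_eq (j : Nat) (hj : j < 5) :
    ((PySem.List.pyGet? columnCounts ((j:Nat):Int)).getD 0 == 0) = decide (j = 1) := by
  interval_cases j <;> decide

set_option maxHeartbeats 1000000 in
theorem AB_eq (grid_ : List (List String)) :
    placeInitialGrass grid_ = placeInitialGrass_alt grid_ := by
  rw [A_char, B_char]
  apply gApply_congr
  intro i j hi hj
  unfold MAfun MBfun
  by_cases hi2 : i = 2
  · subst hi2
    rw [List.getD_eq_getElem?_getD] at hj
    simp [hj]
  · by_cases hi5 : i < 5
    · by_cases hj5 : j < 5
      · rw [adj_iff grid_ i j hi5 hj5, colcnt_eq j hj5]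
        cases hx : hasT grid_ i j <;> simp [hi2, hi5, hj5, hx]
      · simp [hi2, hi5, hj5, show j ≠ 1 by omega]
    · simp [hi2, hi5]

-- ===== VERDICT (by name: the statement is the Claim_ definition above) =====
theorem placeInitialGrass_spec : Claim_equal_placeInitialGrass := by
  intro grid_ _ _
  unfold Spec_placeInitialGrass
  exact AB_eq grid_
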